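-- pv_equiv track=rewrite | github.com/nimezhu/bam2x | lib/bam2x/Turing/TuringUtils.py | bitarray_to_intron_number
-- ===== SOURCE A (Python) =====
-- def bitarray_to_intron_number(bitarray):
--     l=len(bitarray)
--     s=0
--     state=0
--     for i in range(0,l,2):
--         if bitarray[i] and (not bitarray[i+1]):
--             state=1
--         if (not bitarray[i]) and bitarray[i+1]:
--             if state!=-1:
--                 s+=1
--             state=-1
--     return s
-- ===== SOURCE B (Python) =====
-- def bitarray_to_intron_number(bitarray):
--     # Pass 1: turn each index pair into a direction symbol (+1 / -1), skipping neutral pairs.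
--     dirs = []
--     for i in range(0, len(bitarray), 2):
--         hi = bitarray[i]
--         lo = bitarray[i + 1]
--         if hi and not lo:
--             dirs.append(1)
--         elif lo and not hi:
--             dirs.append(-1)
--     # Pass 2: count maximal runs of -1 in the direction sequence.
--     count = 0
--     prev = 0
--     for d in dirs:
--         if d == -1 and prev != -1:
--             count += 1
--         prev = d
--     return count
-- ===== Notes on version B (the rewrite author's own statement) =====
-- stated objective: alternative
-- what changed: B replaces A's persistent three-valued state machine by two passes: it first reduces the bit pairs to a direction list (+1 for (1,0), -1 for (0,1), neutral pairs dropped) and then counts maximal runs of -1 in that list.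
import Mathlib
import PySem

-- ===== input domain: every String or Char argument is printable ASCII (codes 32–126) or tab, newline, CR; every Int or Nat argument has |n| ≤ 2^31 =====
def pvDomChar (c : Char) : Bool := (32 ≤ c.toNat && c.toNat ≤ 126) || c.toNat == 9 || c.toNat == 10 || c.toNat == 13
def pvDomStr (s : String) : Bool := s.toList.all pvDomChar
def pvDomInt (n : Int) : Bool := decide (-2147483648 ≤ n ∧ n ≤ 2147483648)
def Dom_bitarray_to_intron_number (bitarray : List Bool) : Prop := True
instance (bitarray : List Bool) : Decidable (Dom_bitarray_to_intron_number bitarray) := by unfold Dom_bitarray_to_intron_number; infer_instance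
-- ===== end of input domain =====

-- B replaces A's persistent state machine by two passes: pairs → direction list (+1/-1), then
-- count maximal runs of -1; same O(n) cost, different decomposition (objective: alternative).

-- ===== PORT A =====
def bitarray_to_intron_number (bitarray : List Bool) : Int :=
  let l : Int := bitarray.length
  let r : Int × Int :=
    (PySem.List.pyRange 0 l 2).foldl
      (fun acc i =>
        let state :=
          if PySem.List.pyGetD bitarray i false && !(PySem.List.pyGetD bitarray (i+1) false)
          then 1 else acc.2
        if !(PySem.List.pyGetD bitarray i false) && PySem.List.pyGetD bitarray (i+1) false
        then ((if state ≠ -1 then acc.1 + 1 else acc.1), -1)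
        else (acc.1, state))
      (0, 0)
  r.1

-- ===== PORT B =====
def bitarray_to_intron_number_alt (bitarray : List Bool) : Int :=
  let dirs : List Int :=
    (PySem.List.pyRange 0 (bitarray.length : Int) 2).foldl
      (fun ds i =>
        let hi := PySem.List.pyGetD bitarray i false
        let lo := PySem.List.pyGetD bitarray (i+1) false
        if hi && !lo then ds ++ [1]
        else if lo && !hi then ds ++ [-1]
        else ds)
      []
  let r : Int × Int :=
    dirs.foldl (fun acc d => (if d = -1 ∧ acc.2 ≠ -1 then acc.1 + 1 else acc.1, d)) (0, 0)
  r.1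

-- ===== PRECONDITION & SPEC =====
-- Pre_ excludes exactly the odd-length inputs, on which the Python A raises IndexError at bitarray[i+1].
def Pre_bitarray_to_intron_number (bitarray : List Bool) : Prop := bitarray.length % 2 = 0
instance (bitarray : List Bool) : Decidable (Pre_bitarray_to_intron_number bitarray) := by unfold Pre_bitarray_to_intron_number; infer_instance
def pvWitness_bitarray_to_intron_number : List Bool := [true, false, false, true]

def Spec_bitarray_to_intron_number (bitarray : List Bool) (out : Int) : Prop := out = bitarray_to_intron_number_alt bitarray
instance (bitarray : List Bool) (out : Int) : Decidable (Spec_bitarray_to_intron_number bitarray out) := by unfold Spec_bitarray_to_intron_number; infer_instance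

-- ===== CLAIM (what is proved, stated in full; the proofs are below) =====
def Claim_equal_bitarray_to_intron_number : Prop := ∀ (bitarray : List Bool), Dom_bitarray_to_intron_number bitarray → Pre_bitarray_to_intron_number bitarray → Spec_bitarray_to_intron_number bitarray (bitarray_to_intron_number bitarray)

-- ===== LEMMAS AND PROOFS =====

-- The list of adjacent pairs (2i, 2i+1) of an even-length list.
def pvPairs : List Bool → List (Bool × Bool)
  | a :: b :: rest => (a, b) :: pvPairs rest
  | _ => []

-- range(0, n+2, 2) = 0 :: (range(0, n, 2) shifted by 2)
theorem pvRange_two_cons (n : Nat) :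
    PySem.List.pyRange 0 ((n : Int) + 2) 2 = (0 : Int) :: (PySem.List.pyRange 0 (n : Int) 2).map (· + 2) := by
  rw [PySem.List.pyRange_of_pos _ _ (by norm_num), PySem.List.pyRange_of_pos _ _ (by norm_num)]
  have hc : (if (0:Int) < (n:Int) + 2 then (((n:Int) + 2 - 0 + 2 - 1) / 2).toNat else 0)
      = (if (0:Int) < (n:Int) then (((n:Int) - 0 + 2 - 1) / 2).toNat else 0) + 1 := by
    rcases Nat.eq_zero_or_pos n with h | h
    · subst h; norm_num
    · have h' : (0:Int) < (n:Int) := by exact_mod_cast h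
      rw [if_pos (by omega), if_pos h']
      omega
  rw [hc, List.range_succ_eq_map]
  simp [List.map_map, Function.comp]
  intro a _
  ring

-- A fold over range(0, len xs, 2) reading xs[i], xs[i+1] is a fold over the pair list.
theorem pvPairFold {S : Type} (g : S → Bool → Bool → S) :
    ∀ (xs : List Bool), xs.length % 2 = 0 → ∀ (init : S),
      (PySem.List.pyRange 0 (xs.length : Int) 2).foldl
        (fun acc i => g acc (PySem.List.pyGetD xs i false) (PySem.List.pyGetD xs (i+1) false)) init
      = (pvPairs xs).foldl (fun acc p => g acc p.1 p.2) init
  | [], _, init => by simp [PySem.List.pyRange, pvPairs]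
  | [a], h, init => by simp at h
  | a :: b :: rest, h, init => by
    have hlen : ((a :: b :: rest).length : Int) = (rest.length : Int) + 2 := by simp; ring
    rw [hlen, pvRange_two_cons rest.length, List.foldl_cons, List.foldl_map]
    have h0 : PySem.List.pyGetD (a :: b :: rest) 0 false = a := by
      simp [PySem.List.pyGetD_zero_cons]
    have h1 : PySem.List.pyGetD (a :: b :: rest) (0 + 1) false = b := by
      have e : ((0:Int) + 1) = ((1:Nat) : Int) := by norm_num
      rw [e, PySem.List.pyGetD_natCast]; rfl
    rw [h0, h1]
    have hrest : rest.length % 2 = 0 := by simp at h; omega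
    have hcongr :
        (PySem.List.pyRange 0 (rest.length : Int) 2).foldl
          (fun acc i => g acc (PySem.List.pyGetD (a :: b :: rest) (i + 2) false)
                              (PySem.List.pyGetD (a :: b :: rest) (i + 2 + 1) false)) (g init a b)
        = (PySem.List.pyRange 0 (rest.length : Int) 2).foldl
          (fun acc i => g acc (PySem.List.pyGetD rest i false)
                              (PySem.List.pyGetD rest (i+1) false)) (g init a b) := by
      apply PySem.List.foldl_congr_mem
      intro acc i hi
      have hmem := (PySem.List.mem_pyRange_iff_of_pos (by norm_num) i).1 hi
      obtain ⟨h0i, _, hdvd⟩ := hmem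
      obtain ⟨k, hk⟩ : ∃ k : Nat, i = (k : Int) := ⟨i.toNat, by omega⟩
      subst hk
      have e1 : ((k:Int) + 2) = ((k + 2 : Nat) : Int) := by push_cast; ring
      have e2 : (((k + 2 : Nat) : Int) + 1) = ((k + 3 : Nat) : Int) := by push_cast; ring
      have e3 : ((k:Int) + 1) = ((k + 1 : Nat) : Int) := by push_cast; ring
      rw [e1, e2, e3, PySem.List.pyGetD_natCast, PySem.List.pyGetD_natCast,
          PySem.List.pyGetD_natCast, PySem.List.pyGetD_natCast]
      rfl
    rw [hcongr, pvPairFold g rest hrest (g init a b)]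
    rfl

-- the direction extracted from one pair (none for a neutral pair)
def pvDir (p : Bool × Bool) : Option Int :=
  if p.1 && !p.2 then some 1 else if p.2 && !p.1 then some (-1) else none

-- B's first pass builds ds ++ filterMap pvDir ps
theorem pvDirsFold (ps : List (Bool × Bool)) :
    ∀ (ds : List Int),
      ps.foldl (fun ds p => if p.1 && !p.2 then ds ++ [1] else if p.2 && !p.1 then ds ++ [(-1 : Int)] else ds) ds
      = ds ++ ps.filterMap pvDir := by
  induction ps with
  | nil => intro ds; simp
  | cons p ps ih =>
    intro ds
    rcases p with ⟨x, y⟩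
    cases x <;> cases y
    · simpa using ih ds
    · have := ih (ds ++ [(-1 : Int)])
      simpa [pvDir] using this
    · have := ih (ds ++ [(1 : Int)])
      simpa [pvDir] using this
    · simpa [pvDir] using ih ds

-- A's state machine over pairs = B's run-count over the direction list, under the invariant
-- that A's state is -1 exactly when B's previous direction is -1.
theorem pvMain (ps : List (Bool × Bool)) :
    ∀ (s state prev : Int), (state = -1 ↔ prev = -1) →
      (ps.foldl (fun (acc : Int × Int) p =>
          let st := if p.1 && !p.2 then (1 : Int) else acc.2
          if !p.1 && p.2 then ((if st ≠ -1 then acc.1 + 1 else acc.1), -1) else (acc.1, st))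
        (s, state)).1
      = ((ps.filterMap pvDir).foldl
          (fun (acc : Int × Int) d => (if d = -1 ∧ acc.2 ≠ -1 then acc.1 + 1 else acc.1, d)) (s, prev)).1 := by
  induction ps with
  | nil => intro s state prev _; rfl
  | cons p ps ih =>
    intro s state prev hinv
    rcases p with ⟨x, y⟩
    cases x <;> cases y
    · -- (false, false): neutral pair
      simpa [pvDir] using ih s state prev hinv
    · -- (false, true): direction -1
      by_cases hc : state = -1
      · have hp : prev = -1 := hinv.1 hc
        have := ih s (-1) (-1) Iff.rfl
        simpa [pvDir, hc, hp] using this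
      · have hp : prev ≠ -1 := fun h => hc (hinv.2 h)
        have := ih (s + 1) (-1) (-1) Iff.rfl
        simpa [pvDir, hc, hp] using this
    · -- (true, false): direction +1
      have := ih s 1 1 Iff.rfl
      simpa [pvDir] using this
    · -- (true, true): neutral pair
      simpa [pvDir] using ih s state prev hinv

-- ===== VERDICT (by name: the statement is the Claim_ definition above) =====
theorem bitarray_to_intron_number_spec : Claim_equal_bitarray_to_intron_number := by
  intro bitarray _ hpre
  show bitarray_to_intron_number bitarray = bitarray_to_intron_number_alt bitarray
  have hd : (PySem.List.pyRange 0 (bitarray.length : Int) 2).foldl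
        (fun ds i =>
          let hi := PySem.List.pyGetD bitarray i false
          let lo := PySem.List.pyGetD bitarray (i+1) false
          if hi && !lo then ds ++ [(1 : Int)]
          else if lo && !hi then ds ++ [(-1 : Int)]
          else ds) []
      = (pvPairs bitarray).filterMap pvDir :=
    (pvPairFold (fun ds a b =>
        if a && !b then ds ++ [(1 : Int)] else if b && !a then ds ++ [(-1 : Int)] else ds)
      bitarray hpre []).trans
      ((pvDirsFold (pvPairs bitarray) []).trans (List.nil_append _))
  calc bitarray_to_intron_number bitarray
      = ((pvPairs bitarray).foldl (fun (acc : Int × Int) p =>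
          let st := if p.1 && !p.2 then (1 : Int) else acc.2
          if !p.1 && p.2 then ((if st ≠ -1 then acc.1 + 1 else acc.1), -1) else (acc.1, st))
          ((0 : Int), (0 : Int))).1 :=
        congrArg Prod.fst (pvPairFold (fun (acc : Int × Int) a b =>
          let st := if a && !b then (1 : Int) else acc.2
          if !a && b then ((if st ≠ -1 then acc.1 + 1 else acc.1), -1) else (acc.1, st))
          bitarray hpre ((0 : Int), (0 : Int)))
    _ = (((pvPairs bitarray).filterMap pvDir).foldl
          (fun (acc : Int × Int) d => (if d = -1 ∧ acc.2 ≠ -1 then acc.1 + 1 else acc.1, d))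
          ((0 : Int), (0 : Int))).1 := pvMain (pvPairs bitarray) 0 0 0 (by norm_num)
    _ = bitarray_to_intron_number_alt bitarray :=
        congrArg (fun l : List Int =>
          (l.foldl (fun (acc : Int × Int) d =>
            (if d = -1 ∧ acc.2 ≠ -1 then acc.1 + 1 else acc.1, d)) ((0 : Int), (0 : Int))).1) hd.symm
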